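-- pv_equiv track=rewrite | github.com/tannavee/Portfolio | Data Structures/Recursion.py | findPossibilities
-- ===== SOURCE A (Python) =====
-- def findPossibilities(listOfInterest): # defining function, input list "a"
--     listOfPossibilities = [] # list "b"
--     if len(listOfInterest) == 0: # checks if inpted list is empty
--         return listOfPossibilities # returns empty list
--     else:
--         listLen = 0 # defining new variable
--         if len(listOfInterest) % 2 != 0: # if list is odd
--             listLen = len(listOfInterest) - 1 # length of list goes to 2nd to last elmt
--             listOfPossibilities.append(listOfInterest[-1]) # adds the last elmt to "b"
--         else: # if list is even
--             listLen = len(listOfInterest) # length of list goes to the end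
--         i = 0
--         for i in range(0, listLen, 2): # starts at beginning, goes to the end defined above, and travels 2 elmts at a time
--             if listOfInterest[i] == listOfInterest[i + 1]: # is elmt = the next one
--                 listOfPossibilities.append(listOfInterest[i]) # add to b
--
--     if len(listOfPossibilities) > 2:  # if b > 2
--         return findPossibilities(listOfPossibilities) # do recursion
--     elif (len(listOfPossibilities) == 2) and (listOfPossibilities[0] == listOfPossibilities[1]): # b has two elements and they're equal to each other
--         listOfPossibilities.pop() # pop off one
--         return listOfPossibilities
--     else:
--         return listOfPossibilities # otherwise just return b
-- ===== SOURCE B (Python) =====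
-- def findPossibilities(listOfInterest):
--     # Iterative reformulation: explicit loop instead of tail recursion; the
--     # equal-adjacent-pairs scan is done by zipping an iterator with itself
--     # instead of an index loop over range(0, listLen, 2).
--     current = listOfInterest
--     while True:
--         it = iter(current)
--         result = ([current[-1]] if len(current) % 2 else []) \
--                  + [a for a, b in zip(it, it) if a == b]
--         if len(result) > 2:
--             current = result
--         elif len(result) == 2 and result[0] == result[1]:
--             return result[:1]
--         else:
--             return result
-- ===== Notes on version B (the rewrite author's own statement) =====
-- stated objective: alternative
-- what changed: The tail recursion becomes an explicit while-True loop over a 'current' variable, and the index scan over range(0, listLen, 2) becomes a two-at-a-time pair scan by zipping an iterator with itself (no index arithmetic, no listLen bookkeeping).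
import Mathlib
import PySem

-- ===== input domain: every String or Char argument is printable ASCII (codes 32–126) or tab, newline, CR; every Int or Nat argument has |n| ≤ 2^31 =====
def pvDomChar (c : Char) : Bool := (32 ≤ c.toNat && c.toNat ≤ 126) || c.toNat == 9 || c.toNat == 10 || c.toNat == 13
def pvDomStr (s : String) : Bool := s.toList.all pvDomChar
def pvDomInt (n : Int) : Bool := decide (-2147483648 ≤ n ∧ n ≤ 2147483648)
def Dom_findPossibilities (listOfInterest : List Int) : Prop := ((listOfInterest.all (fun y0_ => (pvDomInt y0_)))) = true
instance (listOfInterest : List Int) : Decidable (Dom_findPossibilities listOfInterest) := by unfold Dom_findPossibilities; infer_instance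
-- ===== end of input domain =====

-- B replaces A's tail recursion by an explicit loop and A's index scan over range(0, listLen, 2)
-- by zipping an iterator with itself (structural two-at-a-time pair scan); same values, same cost (objective: alternative).

-- ===== PORT A =====
-- Body of A's main 'else' branch: listLen and the seed of listOfPossibilities come from A's
-- single parity 'if' (written here as two ifs on the same condition), then the for-loop over
-- range(0, listLen, 2).  Indices i and i+1 are always in range
-- (0 ≤ i < listLen ≤ len-1 when odd, = len when even), so pyGetD is exact here.
def pvBuildA (l : List Int) : List Int :=
  (PySem.List.pyRange 0 (if l.length % 2 ≠ 0 then (l.length : Int) - 1 else (l.length : Int)) 2).foldl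
    (fun acc i =>
      if PySem.List.pyGetD l i 0 = PySem.List.pyGetD l (i + 1) 0
      then acc ++ [PySem.List.pyGetD l i 0] else acc)
    (if l.length % 2 ≠ 0 then [PySem.List.pyGetD l (-1) 0] else [])

-- A's recursion, with a fuel counter as a totality guard only: the recursive call strictly
-- shrinks the list (pvBuildA_eq and pvStep_lt below), so fuel = length + 1 is never exhausted
def pvGoA : Nat → List Int → List Int
  | 0, _ => []
  | fuel + 1, l =>
    if l.length = 0 then []
    else
      let b := pvBuildA l
      if b.length > 2 then pvGoA fuel b
      else if b.length = 2 ∧ PySem.List.pyGetD b 0 0 = PySem.List.pyGetD b 1 0 then b.dropLast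
      else b

-- port of A: the given recursive Python, step for step
def findPossibilities (listOfInterest : List Int) : List Int :=
  pvGoA (listOfInterest.length + 1) listOfInterest

-- ===== PORT B =====
-- [a for a, b in zip(it, it) if a == b] with it = iter(current): two-at-a-time pair scan
def pvPairs : List Int → List Int
  | a :: b :: rest => (if a = b then [a] else []) ++ pvPairs rest
  | _ => []

-- one loop body: result = ([current[-1]] if odd else []) + pair scan; current is nonempty
-- when its length is odd, so pyGetD for current[-1] is exact here
def pvStep (cur : List Int) : List Int :=
  (if cur.length % 2 ≠ 0 then [PySem.List.pyGetD cur (-1) 0] else []) ++ pvPairs cur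

-- Source B's while-True loop over 'current', with a fuel counter as a totality guard only:
-- 'current' strictly shrinks each round (pvStep_lt below), so fuel = length + 1 never runs out
def pvGoB : Nat → List Int → List Int
  | 0, _ => []
  | fuel + 1, cur =>
    let res := pvStep cur
    if res.length > 2 then pvGoB fuel res
    else if res.length = 2 ∧ PySem.List.pyGetD res 0 0 = PySem.List.pyGetD res 1 0 then res.take 1
    else res

-- port of B
def findPossibilities_alt (listOfInterest : List Int) : List Int :=
  pvGoB (listOfInterest.length + 1) listOfInterest

-- ===== PRECONDITION & SPEC =====
def Spec_findPossibilities (listOfInterest : List Int) (out : List Int) : Prop := out = findPossibilities_alt listOfInterest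
instance (listOfInterest : List Int) (out : List Int) : Decidable (Spec_findPossibilities listOfInterest out) := by unfold Spec_findPossibilities; infer_instance

-- ===== CLAIM (what is proved, stated in full; the proofs are below) =====
def Claim_equal_findPossibilities : Prop := ∀ (listOfInterest : List Int), Dom_findPossibilities listOfInterest → Spec_findPossibilities listOfInterest (findPossibilities listOfInterest)

-- ===== LEMMAS AND PROOFS =====

lemma pvPairs_len : ∀ l : List Int, 2 * (pvPairs l).length ≤ l.length := by
  intro l
  induction l using pvPairs.induct with
  | case1 a b rest ih => simp only [pvPairs, List.length_append, List.length_cons]; split <;> simp <;> omega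
  | case2 l h => cases l with
    | nil => simp [pvPairs]
    | cons x xs => cases xs with
      | nil => simp [pvPairs]
      | cons y ys => exact absurd rfl (h x y ys)

lemma pvStep_lt (cur : List Int) (h : 2 < (pvStep cur).length) : (pvStep cur).length < cur.length := by
  have hp := pvPairs_len cur
  unfold pvStep at *
  split at h <;> simp_all <;> omega

-- A's index loop over range(0, listLen, 2) collects exactly the structural pair scan of the prefix
lemma pvKey : ∀ (k : Nat) (l : List Int), 2 * k ≤ l.length → ∀ acc : List Int,
    (List.range k).foldl
      (fun (acc : List Int) (j : Nat) =>
        if PySem.List.pyGetD l (2 * (j : Int)) 0 = PySem.List.pyGetD l (2 * (j : Int) + 1) 0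
        then acc ++ [PySem.List.pyGetD l (2 * (j : Int)) 0] else acc) acc
      = acc ++ pvPairs (l.take (2 * k)) := by
  intro k
  induction k with
  | zero => intro l _ acc; simp [pvPairs]
  | succ k ih =>
    intro l hl acc
    match l, hl with
    | x :: y :: rest, hl =>
      rw [List.range_succ_eq_map]
      simp only [List.foldl_cons, List.foldl_map]
      have h01 : PySem.List.pyGetD (x :: y :: rest) (2 * ((0:Nat) : Int)) 0 = x := by
        norm_num [PySem.List.pyGetD_zero_cons]
      have h1 : PySem.List.pyGetD (x :: y :: rest) (2 * ((0:Nat) : Int) + 1) 0 = y := by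
        norm_num
        rw [show (1:Int) = ((1:Nat):Int) from rfl, PySem.List.pyGetD_natCast]
        rfl
      have hbody : (fun (acc : List Int) (j : Nat) =>
          if PySem.List.pyGetD (x :: y :: rest) (2 * ((j.succ : Nat) : Int)) 0
              = PySem.List.pyGetD (x :: y :: rest) (2 * ((j.succ : Nat) : Int) + 1) 0
          then acc ++ [PySem.List.pyGetD (x :: y :: rest) (2 * ((j.succ : Nat) : Int)) 0] else acc)
          = (fun (acc : List Int) (j : Nat) =>
          if PySem.List.pyGetD rest (2 * (j : Int)) 0 = PySem.List.pyGetD rest (2 * (j : Int) + 1) 0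
          then acc ++ [PySem.List.pyGetD rest (2 * (j : Int)) 0] else acc) := by
        funext acc j
        have e1 : (2 * ((j.succ : Nat) : Int)) = ((2 * j + 2 : Nat) : Int) := by push_cast; ring
        rw [e1]
        have e2 : ((2 * j + 2 : Nat) : Int) + 1 = ((2 * j + 3 : Nat) : Int) := by push_cast; ring
        rw [e2]
        have e3 : (2 * ((j : Nat) : Int)) = ((2 * j : Nat) : Int) := by push_cast; ring
        rw [e3]
        have e4 : ((2 * j : Nat) : Int) + 1 = ((2 * j + 1 : Nat) : Int) := by push_cast; ring
        rw [e4]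
        simp only [PySem.List.pyGetD_natCast]
        have g1 : (x :: y :: rest).getD (2 * j + 2) 0 = rest.getD (2 * j) 0 := rfl
        have g2 : (x :: y :: rest).getD (2 * j + 3) 0 = rest.getD (2 * j + 1) 0 := rfl
        rw [g1, g2]
      rw [h01, h1, hbody]
      have hr : 2 * k ≤ rest.length := by simp at hl; omega
      rw [ih rest hr]
      have ht : (x :: y :: rest).take (2 * (k + 1)) = x :: y :: rest.take (2 * k) := by
        have : 2 * (k + 1) = (2 * k) + 1 + 1 := by ring
        rw [this]; rfl
      rw [ht]
      show _ = acc ++ pvPairs (x :: y :: rest.take (2*k))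
      rw [show pvPairs (x :: y :: rest.take (2*k))
            = (if x = y then [x] else []) ++ pvPairs (rest.take (2*k)) from rfl]
      split <;> simp

-- the pair scan ignores a trailing unpaired element
lemma pvPairs_take : ∀ l : List Int, pvPairs l = pvPairs (l.take (2 * (l.length / 2))) := by
  intro l
  induction l using pvPairs.induct with
  | case1 a b rest ih =>
    have hlen : (a :: b :: rest).length / 2 = rest.length / 2 + 1 := by simp; omega
    rw [hlen]
    have : 2 * (rest.length / 2 + 1) = 2 * (rest.length / 2) + 1 + 1 := by ring
    rw [this, List.take_succ_cons, List.take_succ_cons]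
    show (if a = b then [a] else []) ++ pvPairs rest = (if a = b then [a] else []) ++ pvPairs (rest.take _)
    rw [ih]
  | case2 l h => cases l with
    | nil => simp [pvPairs]
    | cons x xs => cases xs with
      | nil => simp [pvPairs]
      | cons y ys => exact absurd rfl (h x y ys)

-- A's loop body equals B's loop body
lemma pvBuildA_eq (l : List Int) : pvBuildA l = pvStep l := by
  unfold pvBuildA pvStep
  have hz : (fun (acc : List Int) (k : Nat) =>
      (fun (acc : List Int) (i : Int) =>
        if PySem.List.pyGetD l i 0 = PySem.List.pyGetD l (i + 1) 0
        then acc ++ [PySem.List.pyGetD l i 0] else acc) acc ((0:Int) + 2 * (k : Int)))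
      = (fun (acc : List Int) (j : Nat) =>
        if PySem.List.pyGetD l (2 * (j : Int)) 0 = PySem.List.pyGetD l (2 * (j : Int) + 1) 0
        then acc ++ [PySem.List.pyGetD l (2 * (j : Int)) 0] else acc) := by
    funext acc j; norm_num
  by_cases hpar : l.length % 2 = 0
  · obtain ⟨m, hm⟩ : ∃ m, l.length = 2 * m := ⟨l.length / 2, by omega⟩
    rw [if_neg (by omega : ¬ l.length % 2 ≠ 0), if_neg (by omega : ¬ l.length % 2 ≠ 0)]
    rw [PySem.List.pyRange_of_pos 0 _ (by norm_num), List.foldl_map, hz]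
    have hcount : (if (0:Int) < (l.length : Int) then (((l.length : Int) - 0 + 2 - 1) / 2).toNat else 0) = m := by
      split <;> omega
    rw [hcount, pvKey m l (by omega), List.nil_append, List.nil_append]
    rw [show l.take (2 * m) = l from by rw [← hm]; exact List.take_length]
  · obtain ⟨m, hm⟩ : ∃ m, l.length = 2 * m + 1 := ⟨l.length / 2, by omega⟩
    rw [if_pos (by omega : l.length % 2 ≠ 0), if_pos (by omega : l.length % 2 ≠ 0)]
    rw [PySem.List.pyRange_of_pos 0 _ (by norm_num), List.foldl_map, hz]
    have hcount : (if (0:Int) < ((l.length : Int) - 1) then ((((l.length : Int) - 1) - 0 + 2 - 1) / 2).toNat else 0) = m := by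
      split <;> omega
    rw [hcount, pvKey m l (by omega)]
    rw [pvPairs_take l, show l.length / 2 = m from by omega]

-- a two-element list: dropping the last = keeping the first
lemma pvTwo (res : List Int) (h : res.length = 2) : res.dropLast = res.take 1 := by
  match res, h with
  | [a, b], _ => rfl

-- the two loops agree whenever both have enough fuel
lemma pvMain : ∀ (f1 : Nat) (f2 : Nat) (l : List Int), l.length < f1 → l.length < f2 →
    pvGoA f1 l = pvGoB f2 l := by
  intro f1
  induction f1 with
  | zero => intro f2 l h1 _; omega
  | succ f1 ih =>
    intro f2 l h1 h2
    match f2, h2 with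
    | f2 + 1, h2 =>
      rw [pvGoA, pvGoB]
      by_cases h0 : l.length = 0
      · have hnil : l = [] := List.length_eq_zero_iff.mp h0
        subst hnil
        simp [pvStep, pvPairs]
      · rw [if_neg h0]
        simp only [pvBuildA_eq]
        split
        · next hgt =>
          have hlt := pvStep_lt l hgt
          exact ih f2 (pvStep l) (by omega) (by omega)
        · next hgt =>
          split
          · next heq => exact pvTwo _ heq.1
          · rfl

-- ===== VERDICT (by name: the statement is the Claim_ definition above) =====
theorem findPossibilities_spec : Claim_equal_findPossibilities := by
  intro l _
  show findPossibilities l = findPossibilities_alt l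
  exact pvMain (l.length + 1) (l.length + 1) l (by omega) (by omega)
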